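-- pv_equiv track=rewrite | github.com/coderAI/cf | cf_convert_money/models/convert_money.py | _convert_nn
-- ===== SOURCE A (Python) =====
-- to_19 = (u'không', u'một', u'hai', u'ba', u'bốn', u'năm', u'sáu',
--           u'bảy', u'tám', u'chín', u'mười', u'mười một', u'mười hai', u'mười ba',
--           u'mười bốn', u'mười lăm', u'mười sáu', u'mười bảy', u'mười tám', u'mười chín')
--
-- tens = (u'hai mươi', u'ba mươi', u'bốn mươi', u'năm mươi', u'sáu mươi', u'bảy mươi', u'tám mươi', u'chín mươi')
--
-- def _convert_nn(val):
--     """convert a value < 100 to Vietnamese.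
--     """
--     if val < 20:
--         return to_19[val]
--     for (dcap, dval) in ((k, 20 + (10 * v)) for (v, k) in enumerate(tens)):
--         if dval + 10 > val:
--             if (val % 10) == 1:
--                 return dcap + u' mốt'
--             elif (val % 10) == 5:
--                 return dcap + u' lăm'
--             elif val % 10:
--                 return dcap + ' ' + to_19[val % 10]
--             return dcap
-- ===== SOURCE B (Python) =====
-- to_19 = (u'không', u'một', u'hai', u'ba', u'bốn', u'năm', u'sáu',
--           u'bảy', u'tám', u'chín', u'mười', u'mười một', u'mười hai', u'mười ba',
--           u'mười bốn', u'mười lăm', u'mười sáu', u'mười bảy', u'mười tám', u'mười chín')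
--
-- tens = (u'hai mươi', u'ba mươi', u'bốn mươi', u'năm mươi', u'sáu mươi', u'bảy mươi', u'tám mươi', u'chín mươi')
--
-- def _convert_nn(val):
--     """convert a value < 100 to Vietnamese (closed-form decade indexing, no scan)."""
--     if val < 20:
--         return to_19[val]
--     dcap = tens[val // 10 - 2]
--     r = val % 10
--     if r == 1:
--         return dcap + u' mốt'
--     if r == 5:
--         return dcap + u' lăm'
--     if r:
--         return dcap + ' ' + to_19[r]
--     return dcap
-- ===== Notes on version B (the rewrite author's own statement) =====
-- stated objective: simpler
-- what changed: The linear scan over the tens tuple (enumerate + dval+10>val search) is replaced by direct closed-form indexing tens[val//10-2], so the loop disappears entirely.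
-- outside the precondition, e.g. on _convert_nn(100): A returns None, B raises IndexError
import Mathlib
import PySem

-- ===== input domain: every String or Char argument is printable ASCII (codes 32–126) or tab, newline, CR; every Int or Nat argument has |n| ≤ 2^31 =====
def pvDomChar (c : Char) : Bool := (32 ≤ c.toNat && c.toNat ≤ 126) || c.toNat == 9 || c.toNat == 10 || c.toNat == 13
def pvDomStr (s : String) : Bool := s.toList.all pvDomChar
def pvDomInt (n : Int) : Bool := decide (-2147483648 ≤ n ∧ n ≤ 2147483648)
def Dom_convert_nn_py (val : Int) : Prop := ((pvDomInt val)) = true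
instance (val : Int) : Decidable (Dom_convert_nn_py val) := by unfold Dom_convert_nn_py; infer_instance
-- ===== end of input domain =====

-- B replaces A's linear scan over the tens tuple with closed-form decade indexing (simpler; return value only).


-- ===== PORT A =====
-- module constants shared by both Pythons
def pvTo19 : List String := ["không", "một", "hai", "ba", "bốn", "năm", "sáu",
  "bảy", "tám", "chín", "mười", "mười một", "mười hai", "mười ba",
  "mười bốn", "mười lăm", "mười sáu", "mười bảy", "mười tám", "mười chín"]

def pvTens : List String := ["hai mươi", "ba mươi", "bốn mươi", "năm mươi",
  "sáu mươi", "bảy mươi", "tám mươi", "chín mươi"]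

-- A's for-loop over ((k, 20 + 10*v) for (v, k) in enumerate(tens)) with early return
def pvLoopA (val : Int) : List (String × Int) → Option String
  | [] => none
  | (dcap, dval) :: rest =>
      if dval + 10 > val then
        if PySem.Int.mod val 10 = 1 then some (dcap ++ " mốt")
        else if PySem.Int.mod val 10 = 5 then some (dcap ++ " lăm")
        else if PySem.Int.mod val 10 ≠ 0 then
          some (dcap ++ " " ++ (PySem.List.pyGet? pvTo19 (PySem.Int.mod val 10)).getD "")
        else some dcap
      else pvLoopA val rest

def convert_nn_py (val : Int) : String :=
  if val < 20 then (PySem.List.pyGet? pvTo19 val).getD ""   -- IndexError / falling off the loop are outside Pre_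
  else (pvLoopA val ((PySem.List.enumerate pvTens).map (fun vk => (vk.2, 20 + 10 * vk.1)))).getD ""

-- ===== PORT B =====
def convert_nn_py_alt (val : Int) : String :=
  if val < 20 then (PySem.List.pyGet? pvTo19 val).getD ""
  else
    let dcap := (PySem.List.pyGet? pvTens (PySem.Int.floordiv val 10 - 2)).getD ""
    let r := PySem.Int.mod val 10
    if r = 1 then dcap ++ " mốt"
    else if r = 5 then dcap ++ " lăm"
    else if r ≠ 0 then dcap ++ " " ++ (PySem.List.pyGet? pvTo19 r).getD ""
    else dcap

-- ===== PRECONDITION & SPEC =====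
-- Pre_ excludes val < -20 (A raises IndexError) and val ≥ 100 (A falls off the loop and returns None, not a string).
def Pre_convert_nn_py (val : Int) : Prop := -20 ≤ val ∧ val < 100
instance (val : Int) : Decidable (Pre_convert_nn_py val) := by unfold Pre_convert_nn_py; infer_instance
def pvWitness_convert_nn_py : Int := 42

def Spec_convert_nn_py (val : Int) (out : String) : Prop := out = convert_nn_py_alt val
instance (val : Int) (out : String) : Decidable (Spec_convert_nn_py val out) := by unfold Spec_convert_nn_py; infer_instance

-- ===== CLAIM (what is proved, stated in full; the proofs are below) =====
def Claim_equal_convert_nn_py : Prop := ∀ (val : Int), Dom_convert_nn_py val → Pre_convert_nn_py val → Spec_convert_nn_py val (convert_nn_py val)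

-- ===== LEMMAS AND PROOFS =====
-- exhaustive check of the 120 admitted inputs, indexed by n = val + 20
theorem pv_key : ∀ n : Fin 120, convert_nn_py ((n : Int) - 20) = convert_nn_py_alt ((n : Int) - 20) := by decide

-- ===== VERDICT (by name: the statement is the Claim_ definition above) =====
theorem convert_nn_py_spec : Claim_equal_convert_nn_py := by
  intro val _ hpre
  obtain ⟨h1, h2⟩ := hpre
  unfold Spec_convert_nn_py
  have hn : (val + 20).toNat < 120 := by omega
  have hcast : (((val + 20).toNat : Int)) = val + 20 := Int.toNat_of_nonneg (by omega)
  have := pv_key ⟨(val + 20).toNat, hn⟩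
  rw [hcast] at this
  simpa using this
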